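-- pv_equiv track=rewrite | github.com/Doonns/WHEEL-LEGGED-BOT | voice_assistant/drivers/DHT20.py | calculate_crc8
-- ===== SOURCE A (Python) =====
-- CRC_POLYNOMIAL = 0x31
--
-- def calculate_crc8(data_buffer, polynomial=CRC_POLYNOMIAL):
--     """Calculates CRC8 checksum (consistent with MicroPython lib logic)"""
--     crc = 0xFF
--     for byte_val in data_buffer:
--         crc ^= byte_val
--         for _ in range(8):
--             if crc & 0x80:
--                 crc = (crc << 1) ^ polynomial
--             else:
--                 crc = (crc << 1)
--     return crc & 0xFF
-- ===== SOURCE B (Python) =====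
-- CRC_POLYNOMIAL = 0x31
--
-- def calculate_crc8(data_buffer, polynomial=CRC_POLYNOMIAL):
--     """CRC8 via a precomputed 256-entry lookup table: one table step per byte."""
--     table = []
--     for i in range(256):
--         c = i
--         for _ in range(8):
--             c = ((c << 1) ^ polynomial) & 0xFF if c & 0x80 else (c << 1) & 0xFF
--         table.append(c)
--     crc = 0xFF
--     for byte_val in data_buffer:
--         crc = table[(crc ^ byte_val) & 0xFF]
--     return crc
-- ===== Notes on version B (the rewrite author's own statement) =====
-- stated objective: faster
-- what changed: Replaces A's per-byte 8-round shift/XOR inner loop with a 256-entry CRC lookup table built once per call, so the data pass is a single masked table lookup per byte; it also keeps crc 8-bit, where A's crc grows by 8 bits per byte (A only masks at the end), making A quadratic in bignum arithmetic.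
import Mathlib
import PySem

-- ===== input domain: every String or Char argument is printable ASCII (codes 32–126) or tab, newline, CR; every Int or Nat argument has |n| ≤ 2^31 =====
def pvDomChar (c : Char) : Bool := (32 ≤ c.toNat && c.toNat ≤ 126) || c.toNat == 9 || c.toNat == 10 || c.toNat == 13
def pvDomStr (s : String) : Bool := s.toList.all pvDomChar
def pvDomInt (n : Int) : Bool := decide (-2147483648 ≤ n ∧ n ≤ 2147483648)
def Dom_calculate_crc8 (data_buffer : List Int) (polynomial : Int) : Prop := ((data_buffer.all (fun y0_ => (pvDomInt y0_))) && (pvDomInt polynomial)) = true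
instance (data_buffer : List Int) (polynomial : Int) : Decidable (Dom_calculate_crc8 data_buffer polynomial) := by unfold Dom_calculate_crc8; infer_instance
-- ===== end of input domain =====

-- B replaces A's per-byte 8-round shift/XOR loop by a 256-entry lookup table built once per call,
-- so the data pass is one table lookup per byte (alternative decomposition; same exact values).

-- ===== PORT A =====
def calculate_crc8 (data_buffer : List Int) (polynomial : Int) : Int :=
  PySem.Int.band
    (data_buffer.foldl (fun crc byte_val =>
      (PySem.List.pyRange 0 8).foldl (fun crc _ =>
        if PySem.Int.band crc 128 ≠ 0 then PySem.Int.bxor (crc <<< (1:Nat)) polynomial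
        else crc <<< (1:Nat)) (PySem.Int.bxor crc byte_val)) 255)
    255

-- ===== PORT B =====
def calculate_crc8_alt (data_buffer : List Int) (polynomial : Int) : Int :=
  let table : List Int := (PySem.List.pyRange 0 256).foldl (fun t i =>
    t ++ [(PySem.List.pyRange 0 8).foldl (fun c _ =>
      if PySem.Int.band c 128 ≠ 0 then PySem.Int.band (PySem.Int.bxor (c <<< (1:Nat)) polynomial) 255
      else PySem.Int.band (c <<< (1:Nat)) 255) i]) []
  -- table[(crc ^ byte_val) & 0xFF]: the index is always in [0, 255], so the default is never used
  data_buffer.foldl (fun crc byte_val =>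
    PySem.List.pyGetD table (PySem.Int.band (PySem.Int.bxor crc byte_val) 255) 0) 255

-- ===== PRECONDITION & SPEC =====
def Spec_calculate_crc8 (data_buffer : List Int) (polynomial : Int) (out : Int) : Prop := out = calculate_crc8_alt data_buffer polynomial
instance (data_buffer : List Int) (polynomial : Int) (out : Int) : Decidable (Spec_calculate_crc8 data_buffer polynomial out) := by unfold Spec_calculate_crc8; infer_instance

-- ===== CLAIM (what is proved, stated in full; the proofs are below) =====
def Claim_equal_calculate_crc8 : Prop := ∀ (data_buffer : List Int) (polynomial : Int), Dom_calculate_crc8 data_buffer polynomial → Spec_calculate_crc8 data_buffer polynomial (calculate_crc8 data_buffer polynomial)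

-- ===== LEMMAS AND PROOFS =====

-- Nat facts about 8-bit masking
lemma natMod256_eq_and (a : Nat) : a % 256 = a &&& 255 := (Nat.and_two_pow_sub_one_eq_mod a 8).symm

lemma natXor_mod256 (a b : Nat) : (a ^^^ b) % 256 = a % 256 ^^^ b % 256 := by
  rw [natMod256_eq_and, Nat.and_xor_distrib_right, ← natMod256_eq_and, ← natMod256_eq_and]

set_option maxRecDepth 4096 in
lemma natCompl8 : ∀ t, t < 256 → 255 - t = 255 ^^^ t := by decide

lemma natComplXor8 (r s : Nat) (hr : r < 256) (hs : s < 256) : 255 - (r ^^^ s) = r ^^^ (255 - s) := by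
  rw [natCompl8 _ (Nat.xor_lt_two_pow (n := 8) hr hs), natCompl8 _ hs, ← Nat.xor_assoc,
    Nat.xor_comm 255 r, Nat.xor_assoc]

set_option maxRecDepth 4096 in
lemma natBit7_compl : ∀ r, r < 256 → 128 - (r &&& 128) = (255 - r) &&& 128 := by decide

lemma natAnd128_mod256 (a : Nat) : a &&& 128 = a % 256 &&& 128 := by
  rw [natMod256_eq_and, Nat.and_assoc, show (255 &&& 128 : Nat) = 128 from rfl]

-- band with 255 is the low byte (Python & 0xFF, also on negatives)
lemma band255 (x : Int) : PySem.Int.band x 255 = ((x % 256).toNat : Int) := by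
  unfold PySem.Int.band
  simp only [if_pos (show (0:Int) ≤ 255 by norm_num)]
  split_ifs with hx
  · rw [show ((255:Int).toNat) = 255 from rfl, ← natMod256_eq_and]
    omega
  · rw [show ((255:Int).toNat) = 255 from rfl, Nat.and_comm, ← natMod256_eq_and]
    omega

-- band with 128 only reads the low byte
lemma band128 (x : Int) : PySem.Int.band x 128 = (((x % 256).toNat &&& 128 : Nat) : Int) := by
  unfold PySem.Int.band
  simp only [if_pos (show (0:Int) ≤ 128 by norm_num)]
  split_ifs with hx
  · rw [show ((128:Int).toNat) = 128 from rfl, natAnd128_mod256,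
      show x.toNat % 256 = (x % 256).toNat by omega]
  · rw [show ((128:Int).toNat) = 128 from rfl, Nat.and_comm, natAnd128_mod256,
      natBit7_compl _ (by omega), show 255 - (-x - 1).toNat % 256 = (x % 256).toNat by omega]

-- xor respects the low byte
lemma low8_bxor (x y : Int) : ((PySem.Int.bxor x y) % 256).toNat = (x % 256).toNat ^^^ (y % 256).toNat := by
  unfold PySem.Int.bxor
  split_ifs with hx hy hy
  · rw [show (((x.toNat ^^^ y.toNat : Nat) : Int) % 256).toNat = (x.toNat ^^^ y.toNat) % 256 by omega,
      natXor_mod256, show x.toNat % 256 = (x % 256).toNat by omega,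
      show y.toNat % 256 = (y % 256).toNat by omega]
  · rw [show ((-((x.toNat ^^^ (-y - 1).toNat : Nat) : Int) - 1) % 256).toNat
        = 255 - (x.toNat ^^^ (-y - 1).toNat) % 256 by omega, natXor_mod256,
      natComplXor8 _ _ (by omega) (by omega), show x.toNat % 256 = (x % 256).toNat by omega,
      show 255 - (-y - 1).toNat % 256 = (y % 256).toNat by omega]
  · rw [show ((-(((-x - 1).toNat ^^^ y.toNat : Nat) : Int) - 1) % 256).toNat
        = 255 - ((-x - 1).toNat ^^^ y.toNat) % 256 by omega, natXor_mod256,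
      Nat.xor_comm ((-x-1).toNat % 256), natComplXor8 _ _ (by omega) (by omega),
      show y.toNat % 256 = (y % 256).toNat by omega,
      show 255 - (-x - 1).toNat % 256 = (x % 256).toNat by omega, Nat.xor_comm]
  · rw [show ((((((-x - 1).toNat ^^^ (-y - 1).toNat : Nat)) : Int)) % 256).toNat
        = ((-x - 1).toNat ^^^ (-y - 1).toNat) % 256 by omega, natXor_mod256,
      show (x % 256).toNat = 255 - (-x - 1).toNat % 256 by omega,
      show (y % 256).toNat = 255 - (-y - 1).toNat % 256 by omega,
      natCompl8 _ (by omega), natCompl8 _ (by omega), ← Nat.xor_assoc,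
      Nat.xor_comm (255 ^^^ (-x-1).toNat % 256) 255, ← Nat.xor_assoc]
    simp

-- left shift by one respects the low byte
lemma low8_shift (x : Int) : ((x <<< (1:Nat)) % 256).toNat = 2 * (x % 256).toNat % 256 := by
  rw [Int.shiftLeft_eq]
  norm_num
  omega

-- one inner round: B's masked round applied to the low byte equals the low byte of A's round
lemma round_cong (p c c' : Int) (h : c' = (((c % 256).toNat : Nat) : Int)) :
    (if PySem.Int.band c' 128 ≠ 0 then PySem.Int.band (PySem.Int.bxor (c' <<< (1:Nat)) p) 255
     else PySem.Int.band (c' <<< (1:Nat)) 255)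
    = ((((if PySem.Int.band c 128 ≠ 0 then PySem.Int.bxor (c <<< (1:Nat)) p
          else c <<< (1:Nat)) % 256).toNat : Nat) : Int) := by
  have hc : (c' % 256).toNat = (c % 256).toNat := by omega
  rw [band128 c', band128 c, hc]
  split_ifs with hcond
  · rw [band255, low8_bxor, low8_bxor, low8_shift, low8_shift, hc]
  · rw [band255, low8_shift, low8_shift, hc]

-- the 8-round loops stay in lockstep (B's state is the low byte of A's state)
lemma rounds_cong (p : Int) (L : List Int) (c c' : Int) (h : c' = (((c % 256).toNat : Nat) : Int)) :
    L.foldl (fun a _ =>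
      if PySem.Int.band a 128 ≠ 0 then PySem.Int.band (PySem.Int.bxor (a <<< (1:Nat)) p) 255
      else PySem.Int.band (a <<< (1:Nat)) 255) c'
    = ((((L.foldl (fun a _ =>
        if PySem.Int.band a 128 ≠ 0 then PySem.Int.bxor (a <<< (1:Nat)) p
        else a <<< (1:Nat)) c) % 256).toNat : Nat) : Int) := by
  induction L generalizing c c' with
  | nil => simpa using h
  | cons hd tl ih =>
    simp only [List.foldl_cons]
    exact ih _ _ (round_cong p c c' h)

-- B's table, unfolded to a map over 0..255
lemma table_eq (p : Int) :
    (PySem.List.pyRange 0 256).foldl (fun t i =>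
      t ++ [(PySem.List.pyRange 0 8).foldl (fun c _ =>
        if PySem.Int.band c 128 ≠ 0 then PySem.Int.band (PySem.Int.bxor (c <<< (1:Nat)) p) 255
        else PySem.Int.band (c <<< (1:Nat)) 255) i]) []
    = (List.range 256).map (fun n =>
        (PySem.List.pyRange 0 8).foldl (fun c _ =>
          if PySem.Int.band c 128 ≠ 0 then PySem.Int.band (PySem.Int.bxor (c <<< (1:Nat)) p) 255
          else PySem.Int.band (c <<< (1:Nat)) 255) ((n : Nat) : Int)) := by
  rw [PySem.List.foldl_append_singleton_eq_map, show (256:Int) = ((256:Nat):Int) by norm_num,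
    PySem.List.pyRange_zero_natCast, List.map_map]
  rfl

-- table lookup at a small natural index
lemma table_get (p : Int) (n : Nat) (hn : n < 256) :
    PySem.List.pyGetD ((List.range 256).map (fun k =>
      (PySem.List.pyRange 0 8).foldl (fun c _ =>
        if PySem.Int.band c 128 ≠ 0 then PySem.Int.band (PySem.Int.bxor (c <<< (1:Nat)) p) 255
        else PySem.Int.band (c <<< (1:Nat)) 255) ((k : Nat) : Int))) ((n : Nat) : Int) 0
    = (PySem.List.pyRange 0 8).foldl (fun c _ =>
        if PySem.Int.band c 128 ≠ 0 then PySem.Int.band (PySem.Int.bxor (c <<< (1:Nat)) p) 255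
        else PySem.Int.band (c <<< (1:Nat)) 255) ((n : Nat) : Int) := by
  rw [PySem.List.pyGetD_natCast, List.getD_eq_getElem?_getD, List.getElem?_map]
  simp [List.getElem?_range hn]

-- the byte loops stay in lockstep
lemma fold_cong (p : Int) (bs : List Int) (a b : Int) (h : b = (((a % 256).toNat : Nat) : Int)) :
    bs.foldl (fun crc byte_val =>
      PySem.List.pyGetD ((List.range 256).map (fun k =>
        (PySem.List.pyRange 0 8).foldl (fun c _ =>
          if PySem.Int.band c 128 ≠ 0 then PySem.Int.band (PySem.Int.bxor (c <<< (1:Nat)) p) 255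
          else PySem.Int.band (c <<< (1:Nat)) 255) ((k : Nat) : Int)))
        (PySem.Int.band (PySem.Int.bxor crc byte_val) 255) 0) b
    = ((((bs.foldl (fun crc byte_val =>
        (PySem.List.pyRange 0 8).foldl (fun c _ =>
          if PySem.Int.band c 128 ≠ 0 then PySem.Int.bxor (c <<< (1:Nat)) p
          else c <<< (1:Nat)) (PySem.Int.bxor crc byte_val)) a) % 256).toNat : Nat) : Int) := by
  induction bs generalizing a b with
  | nil => simpa using h
  | cons hd tl ih =>
    simp only [List.foldl_cons]
    apply ih
    rw [band255, low8_bxor]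
    have hidx : ((PySem.Int.bxor b hd) % 256).toNat = ((PySem.Int.bxor a hd) % 256).toNat := by
      rw [low8_bxor, low8_bxor]
      congr 1
      omega
    rw [show (b % 256).toNat ^^^ (hd % 256).toNat = ((PySem.Int.bxor a hd) % 256).toNat by
      rw [← hidx, low8_bxor]]
    rw [table_get p _ (by omega)]
    exact rounds_cong p _ _ _ rfl

-- ===== VERDICT (by name: the statement is the Claim_ definition above) =====
theorem calculate_crc8_spec : Claim_equal_calculate_crc8 := by
  intro data_buffer polynomial _
  unfold Spec_calculate_crc8 calculate_crc8 calculate_crc8_alt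
  rw [table_eq, band255]
  rw [fold_cong polynomial data_buffer 255 255 (by norm_num)]
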